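-- pv_equiv track=rewrite | github.com/TheAlgorithms/Python | ciphers/beaufort-cipher.py | useCipher
-- ===== SOURCE A (Python) =====
-- alphabet = ".ABCDEFGHIJKLMNOPQRSTUVWXYZabcdefghijklmnopqrstuvwxyz"
--
-- dictionary = {v: k for k, v in enumerate(alphabet)}
--
-- def translateCharacter(char, key):
--     """Translates a character using the key and tabula recta"""
--     for x in range(0, len(alphabet)):
--         if dictionary[char] + x > len(alphabet) - 1:
--             if dictionary[char] + x - len(alphabet) == dictionary[key]:
--                 return alphabet[x]
--         else:
--             if dictionary[char] + x == dictionary[key]: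
--                 return alphabet[x]
--
-- def filterInput(string):
--     """Filters input from characters that aren't in the alphabet"""
--     for n in range(len(string)):
--         if not string[n] in alphabet:
--             string = string.replace(string[n], alphabet[0])
--     return string
--
-- def assignKeyMask(input, key):
--     """Assigns a key mask with the same length of a given input"""
--     keymask = str()
--     for i in range(0, len(input) // len(key)):
--         keymask += key
--     for i in range(0, len(input) % len(key)):
--         keymask += key[i]
--     return keymask
--
-- def useCipher(text, key):
--     """Encodes or decodes your input"""
--     result = str()
--     text = filterInput(text)
--     key = filterInput(key)
--     keymask = assignKeyMask(text, key)
--     for i in range(0, len(text)):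
--         result += translateCharacter(text[i], keymask[i])
--     return result
-- ===== SOURCE B (Python) =====
-- alphabet = ".ABCDEFGHIJKLMNOPQRSTUVWXYZabcdefghijklmnopqrstuvwxyz"
--
-- def useCipher(text, key):
--     """Encodes or decodes your input"""
--     idx = {c: i for i, c in enumerate(alphabet)}
--     n = len(alphabet)
--     t = [c if c in idx else alphabet[0] for c in text]
--     k = [c if c in idx else alphabet[0] for c in key]
--     m = len(k)
--     return "".join(alphabet[(idx[k[i % m]] - idx[c]) % n] for i, c in enumerate(t))
-- ===== Notes on version B (the rewrite author's own statement) =====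
-- stated objective: faster
-- what changed: B replaces A's per-character linear scan of the tabula recta (translateCharacter's loop over the alphabet) and A's replace-based filtering with a precomputed index dictionary, per-character filtering and direct modular arithmetic alphabet[(key_idx - char_idx) % len(alphabet)], building the result with a single join.
import Mathlib
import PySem

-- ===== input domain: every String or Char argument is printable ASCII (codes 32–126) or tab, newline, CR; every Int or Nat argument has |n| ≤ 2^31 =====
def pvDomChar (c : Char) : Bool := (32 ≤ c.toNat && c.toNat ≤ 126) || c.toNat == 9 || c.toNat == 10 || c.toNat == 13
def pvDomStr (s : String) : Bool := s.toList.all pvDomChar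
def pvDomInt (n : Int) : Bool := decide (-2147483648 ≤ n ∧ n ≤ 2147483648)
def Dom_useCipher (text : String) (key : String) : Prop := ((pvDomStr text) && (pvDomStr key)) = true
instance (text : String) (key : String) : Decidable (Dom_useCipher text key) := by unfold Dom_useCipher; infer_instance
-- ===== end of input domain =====

-- Beaufort cipher: B replaces A's per-character scan of the tabula recta by direct
-- modular index arithmetic (x = (key_idx - char_idx) % len(alphabet)) and per-char filtering.


-- shared module-level constant: alphabet
def pvAlphabet : List Char := ".ABCDEFGHIJKLMNOPQRSTUVWXYZabcdefghijklmnopqrstuvwxyz".toList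

-- ===== PORT A =====

-- dictionary = {v: k for k, v in enumerate(alphabet)}
def pvDictionary : PySem.Dict Char Int :=
  (PySem.List.enumerate pvAlphabet 0).foldl (fun d p => d.insert p.2 p.1) PySem.Dict.empty

-- translateCharacter(char, key); Python returns a 1-char string or falls off (None);
-- dictionary[char] cannot raise here (callers pass filtered characters): getD 0 is unreachable otherwise.
def pvTranslateCharacter (ch : Char) (key : Char) : Option Char :=
  let dc := pvDictionary.getD ch 0
  let dk := pvDictionary.getD key 0
  (PySem.List.pyRange 0 (pvAlphabet.length : Int) 1).findSome? (fun x =>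
    if dc + x > (pvAlphabet.length : Int) - 1 then
      if dc + x - (pvAlphabet.length : Int) = dk then PySem.List.pyGet? pvAlphabet x else none
    else
      if dc + x = dk then PySem.List.pyGet? pvAlphabet x else none)

-- filterInput(string): for n in range(len(string)): if string[n] not in alphabet, replace all
-- its occurrences by alphabet[0] ('.'). string[n] is always in range (replace preserves length);
-- the none branch is unreachable.
def pvFilterInput (s : List Char) : List Char :=
  (PySem.List.pyRange 0 (s.length : Int) 1).foldl (fun st n =>
    match PySem.List.pyGet? st n with
    | none => st
    | some c =>
      if PySem.Chars.isIn [c] pvAlphabet then st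
      else PySem.Chars.replace st [c] ['.']) s  -- alphabet[0] = '.'

-- assignKeyMask(input, key): len//len and len%len on nonnegative lengths are Nat / and %
-- (exact for key ≠ ""; key = "" raises ZeroDivisionError in Python and is excluded by Pre_).
def pvAssignKeyMask (input : List Char) (key : List Char) : List Char :=
  let m1 := (PySem.List.pyRange 0 ((input.length / key.length : Nat) : Int) 1).foldl
              (fun km _ => km ++ key) ([] : List Char)
  (PySem.List.pyRange 0 ((input.length % key.length : Nat) : Int) 1).foldl
    (fun km i => km ++ ((PySem.List.pyGet? key i).elim [] ([·]))) m1

def useCipher (text : String) (key : String) : String :=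
  let t := pvFilterInput text.toList
  let k := pvFilterInput key.toList
  let keymask := pvAssignKeyMask t k
  -- result += translateCharacter(text[i], keymask[i]); indices in range, translate returns some
  String.mk ((PySem.List.pyRange 0 (t.length : Int) 1).foldl (fun res i =>
    res ++ ((pvTranslateCharacter ((PySem.List.pyGet? t i).getD '.')
              ((PySem.List.pyGet? keymask i).getD '.')).elim [] ([·]))) [])

-- ===== PORT B =====

-- idx = {c: i for i, c in enumerate(alphabet)}
def pvIdxB : PySem.Dict Char Int :=
  (PySem.List.enumerate pvAlphabet 0).foldl (fun d p => d.insert p.2 p.1) PySem.Dict.empty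

-- c if c in idx else alphabet[0]
def pvFixB (c : Char) : Char := if pvIdxB.contains c then c else '.'

-- alphabet[(idx[k[i % m]] - idx[c]) % n]; the dict lookups cannot raise (chars are fixed):
-- getD 0 / getD '.' are unreachable defaults.
def pvEncCharB (k : List Char) (i : Int) (c : Char) : Char :=
  let kc := (PySem.List.pyGet? k (PySem.Int.mod i (k.length : Int))).getD '.'
  (PySem.List.pyGet? pvAlphabet
    (PySem.Int.mod (pvIdxB.getD kc 0 - pvIdxB.getD c 0) (pvAlphabet.length : Int))).getD '.'

def useCipher_alt (text : String) (key : String) : String :=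
  let t := text.toList.map pvFixB
  let k := key.toList.map pvFixB
  String.mk ((PySem.List.enumerate t 0).map (fun p => pvEncCharB k p.1 p.2))

-- ===== PRECONDITION & SPEC =====
-- Pre_ excludes the empty key, on which Python A raises ZeroDivisionError in assignKeyMask.
def Pre_useCipher (text : String) (key : String) : Prop := key.toList ≠ []
instance (text : String) (key : String) : Decidable (Pre_useCipher text key) := by
  unfold Pre_useCipher; infer_instance

def pvWitness_useCipher : String × String := ("Hello, World!", "key")

def Spec_useCipher (text : String) (key : String) (out : String) : Prop := out = useCipher_alt text key
instance (text : String) (key : String) (out : String) : Decidable (Spec_useCipher text key out) := by unfold Spec_useCipher; infer_instance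

-- ===== CLAIM (what is proved, stated in full; the proofs are below) =====
def Claim_equal_useCipher : Prop := ∀ (text : String) (key : String), Dom_useCipher text key → Pre_useCipher text key → Spec_useCipher text key (useCipher text key)

-- ===== LEMMAS AND PROOFS =====

set_option maxRecDepth 40000
lemma alphaLen : (pvAlphabet.length : Int) = 53 := by decide
lemma alphaNodup : pvAlphabet.Nodup := by decide
lemma dotMem : '.' ∈ pvAlphabet := by decide

lemma getD_fold_untouched (l : List (Int × Char)) (d : PySem.Dict Char Int) (c : Char)
    (h : c ∉ l.map (·.2)) :
    (l.foldl (fun d p => d.insert p.2 p.1) d).getD c 0 = d.getD c 0 := by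
  induction l generalizing d with
  | nil => rfl
  | cons p l ih =>
    simp only [List.map_cons, List.mem_cons, not_or] at h
    rw [List.foldl_cons, ih _ h.2, PySem.Dict.getD_insert_of_ne _ _ _ h.1]

lemma getD_fold_enum (xs : List Char) (s : Int) (d : PySem.Dict Char Int) (c : Char)
    (hnd : xs.Nodup) (hc : c ∈ xs) :
    ((PySem.List.enumerate xs s).foldl (fun d p => d.insert p.2 p.1) d).getD c 0
      = s + (xs.idxOf c : Int) := by
  induction xs generalizing s d with
  | nil => cases hc
  | cons a xs ih =>
    rw [PySem.List.enumerate_cons, List.foldl_cons]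
    rcases List.mem_cons.1 hc with rfl | hmem
    · rw [getD_fold_untouched _ _ _ (by
        simpa [PySem.List.map_snd_enumerate] using (List.nodup_cons.1 hnd).1)]
      simp [PySem.Dict.getD_insert_self]
    · have hne : c ≠ a := fun h => (List.nodup_cons.1 hnd).1 (h ▸ hmem)
      rw [ih (s+1) _ (List.nodup_cons.1 hnd).2 hmem, List.idxOf_cons_ne _ (Ne.symm hne)]
      push_cast; ring

lemma getD_alpha {c : Char} (hc : c ∈ pvAlphabet) :
    pvDictionary.getD c 0 = (pvAlphabet.idxOf c : Int) := by
  simpa using getD_fold_enum pvAlphabet 0 PySem.Dict.empty c alphaNodup hc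

lemma getD_alpha_bounds {c : Char} (hc : c ∈ pvAlphabet) :
    0 ≤ pvDictionary.getD c 0 ∧ pvDictionary.getD c 0 < 53 := by
  rw [getD_alpha hc]
  have := List.idxOf_lt_length_of_mem hc
  have h53 : pvAlphabet.length = 53 := by decide
  omega

lemma contains_eq (c : Char) : pvDictionary.contains c = decide (c ∈ pvAlphabet) := by
  rw [PySem.Dict.contains_eq_decide_mem_keys]
  have hk : c ∈ pvDictionary.keys ↔ c ∈ pvAlphabet := by
    unfold pvDictionary
    rw [PySem.Dict.keys_foldl_insert_key]
    simp [PySem.List.map_snd_enumerate, PySem.Dict.keys_empty]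
  simp [hk]

lemma isIn_single (c : Char) : PySem.Chars.isIn [c] pvAlphabet = decide (c ∈ pvAlphabet) := by
  rcases h : PySem.Chars.isIn [c] pvAlphabet with _ | _
  · rw [PySem.Chars.isIn_eq_false_iff, List.singleton_infix_iff] at h
    simp [h]
  · rw [PySem.Chars.isIn_iff_infix, List.singleton_infix_iff] at h
    simp [h]

lemma replace_go_single (c d : Char) : ∀ (fuel : Nat) (l acc : List Char), l.length ≤ fuel →
    PySem.Chars.replace.go [c] [d] fuel l acc
      = acc.reverse ++ l.map (fun x => if x = c then d else x) := by
  intro fuel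
  induction fuel with
  | zero =>
    intro l acc h
    have : l = [] := List.length_eq_zero_iff.1 (Nat.le_zero.1 h)
    subst this
    simp [PySem.Chars.replace.go]
  | succ n ih =>
    intro l acc h
    cases l with
    | nil => simp [PySem.Chars.replace.go]
    | cons x t =>
      by_cases hx : x = c
      · subst hx
        have hp : List.isPrefixOf [x] (x :: t) = true := by simp [List.isPrefixOf]
        simp only [PySem.Chars.replace.go, hp, if_true]
        rw [show List.drop [x].length (x::t) = t from rfl,
            ih t _ (by simpa using Nat.le_of_succ_le_succ h)]
        simp
      · have hp : List.isPrefixOf [c] (x :: t) = false := by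
          simp [List.isPrefixOf]; exact fun hh => (hx hh.symm).elim
        simp only [PySem.Chars.replace.go, hp, Bool.false_eq_true, if_false]
        rw [ih t _ (by simpa using Nat.le_of_succ_le_succ h)]
        simp [hx]

lemma replace_single (s : List Char) (c d : Char) :
    PySem.Chars.replace s [c] [d] = s.map (fun x => if x = c then d else x) := by
  rw [PySem.Chars.replace]
  simp only [List.isEmpty_cons, Bool.false_eq_true, if_false]
  exact replace_go_single c d s.length s [] (le_refl _)

def pvG (s : List Char) (n : Nat) (c : Char) : Char :=
  if c ∈ pvAlphabet then c else if c ∈ s.take n then '.' else c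

lemma filter_inv (s : List Char) : ∀ n, n ≤ s.length →
    (List.range n).foldl (fun st (k : Nat) =>
      match PySem.List.pyGet? st (k : Int) with
      | none => st
      | some c => if PySem.Chars.isIn [c] pvAlphabet then st
                  else PySem.Chars.replace st [c] ['.']) s = s.map (pvG s n) := by
  intro n
  induction n with
  | zero =>
    intro _
    rw [List.range_zero, List.foldl_nil]
    have hid : s.map (pvG s 0) = s.map id := List.map_congr_left fun c _ => by simp [pvG]
    rw [hid, List.map_id]
  | succ n ih =>
    intro h
    have hn : n < s.length := by omega
    rw [List.range_succ, List.foldl_append, ih (by omega), List.foldl_cons, List.foldl_nil]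
    have hget : PySem.List.pyGet? (s.map (pvG s n)) (n : Int) = some (pvG s n (s[n]'hn)) := by
      rw [PySem.List.pyGet?_natCast, List.getElem?_map, List.getElem?_eq_getElem hn]
      rfl
    rw [hget]
    dsimp only
    have htake : s.take (n+1) = s.take n ++ [s[n]'hn] := by
      rw [List.take_succ, List.getElem?_eq_getElem hn]
      rfl
    by_cases ha : (s[n]'hn) ∈ pvAlphabet
    · -- character in the alphabet: the loop body skips, and pvG is unchanged
      have he : pvG s n (s[n]'hn) = (s[n]'hn) := by simp [pvG, ha]
      rw [he, isIn_single, decide_eq_true ha, if_pos rfl]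
      refine List.map_congr_left (fun c _ => ?_)
      unfold pvG
      by_cases hc : c ∈ pvAlphabet
      · rw [if_pos hc, if_pos hc]
      · have hne : c ≠ s[n]'hn := fun e => hc (e ▸ ha)
        rw [if_neg hc, if_neg hc, htake]
        by_cases hct : c ∈ s.take n
        · rw [if_pos hct, if_pos (List.mem_append.2 (Or.inl hct))]
        · rw [if_neg hct, if_neg (fun hm => (List.mem_append.1 hm).elim hct
            (fun h2 => hne (List.mem_singleton.1 h2)))]
    · by_cases hseen : (s[n]'hn) ∈ s.take n
      · -- bad character already replaced earlier: the current cell holds '.', skip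
        have he : pvG s n (s[n]'hn) = '.' := by simp [pvG, ha, hseen]
        rw [he, isIn_single, decide_eq_true dotMem, if_pos rfl]
        refine List.map_congr_left (fun c _ => ?_)
        unfold pvG
        by_cases hc : c ∈ pvAlphabet
        · rw [if_pos hc, if_pos hc]
        · rw [if_neg hc, if_neg hc, htake]
          by_cases hct : c ∈ s.take n
          · rw [if_pos hct, if_pos (List.mem_append.2 (Or.inl hct))]
          · have hne : c ≠ s[n]'hn := fun e => hct (e ▸ hseen)
            rw [if_neg hct, if_neg (fun hm => (List.mem_append.1 hm).elim hct
              (fun h2 => hne (List.mem_singleton.1 h2)))]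
      · -- fresh bad character: the loop body replaces all its occurrences
        have he : pvG s n (s[n]'hn) = (s[n]'hn) := by simp [pvG, ha, hseen]
        rw [he, isIn_single, decide_eq_false ha]
        rw [if_neg (by simp)]
        rw [replace_single, List.map_map]
        refine List.map_congr_left (fun c _ => ?_)
        simp only [Function.comp_apply]
        unfold pvG
        by_cases hc : c ∈ pvAlphabet
        · have hne : c ≠ s[n]'hn := fun e => ha (e ▸ hc)
          rw [if_pos hc, if_pos hc, if_neg hne]
        · rw [if_neg hc, if_neg hc, htake]
          by_cases hct : c ∈ s.take n
          · have hne : ('.' : Char) ≠ s[n]'hn := fun e => ha (e ▸ dotMem)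
            rw [if_pos hct, if_pos (List.mem_append.2 (Or.inl hct)), if_neg hne]
          · by_cases hca : c = s[n]'hn
            · rw [if_neg hct, if_pos hca, if_pos (List.mem_append.2 (Or.inr
                (List.mem_singleton.2 hca)))]
            · rw [if_neg hct, if_neg hca, if_neg (fun hm => (List.mem_append.1 hm).elim hct
                (fun h2 => hca (List.mem_singleton.1 h2)))]

lemma filter_eq_map (s : List Char) :
    pvFilterInput s = s.map (fun c => if c ∈ pvAlphabet then c else '.') := by
  rw [pvFilterInput, PySem.List.pyRange_zero_natCast, List.foldl_map,
    filter_inv s s.length (le_refl _)]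
  refine List.map_congr_left (fun c hc => ?_)
  unfold pvG
  by_cases h : c ∈ pvAlphabet
  · simp [h]
  · simp [h, List.take_length, hc]

lemma option_elim_toList {α : Type} (o : Option α) : o.elim [] ([·]) = o.toList := by
  cases o <;> rfl

lemma flatMap_get?_take (k : List Char) : ∀ r : Nat,
    (List.range r).flatMap (fun j => (k[j]?).toList) = k.take r := by
  intro r
  induction r with
  | zero => simp
  | succ r ih => rw [List.range_succ, List.flatMap_append, ih, List.take_succ]; simp

lemma flatten_replicate_get? (k : List Char) : ∀ (q i : Nat), i < q * k.length →
    (List.flatten (List.replicate q k))[i]? = k[i % k.length]? := by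
  intro q
  induction q with
  | zero => omega
  | succ q ih =>
    intro i hi
    rw [List.replicate_succ, List.flatten_cons]
    by_cases h : i < k.length
    · rw [List.getElem?_append_left h, Nat.mod_eq_of_lt h]
    · have hle : k.length ≤ i := by omega
      rw [List.getElem?_append_right hle, ih (i - k.length) (by
        have hmul : (q+1) * k.length = q * k.length + k.length := by ring
        omega), Nat.mod_eq_sub_mod hle]

lemma mask_eq (t k : List Char) :
    pvAssignKeyMask t k = (List.replicate (t.length / k.length) k).flatten
      ++ k.take (t.length % k.length) := by
  unfold pvAssignKeyMask
  rw [PySem.List.foldl_append_eq_flatMap, PySem.List.foldl_append_eq_flatMap]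
  rw [PySem.List.pyRange_zero_natCast, PySem.List.pyRange_zero_natCast]
  rw [List.flatMap_map, List.flatMap_map, List.nil_append]
  congr 1
  · rw [List.flatMap_def, List.map_const', List.length_range]
  · rw [List.flatMap_congr (g := fun j => (k[j]?).toList)
      (fun j hj => by rw [PySem.List.pyGet?_natCast, option_elim_toList])]
    exact flatMap_get?_take k _

lemma mask_get? (t k : List Char) (hk : k ≠ []) (i : Nat) (hi : i < t.length) :
    (pvAssignKeyMask t k)[i]? = k[i % k.length]? := by
  have hm : 0 < k.length := List.length_pos_iff.2 hk
  have hqm' := Nat.div_add_mod t.length k.length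
  have hqm : t.length / k.length * k.length + t.length % k.length = t.length := by
    rw [Nat.mul_comm] at hqm'; exact hqm'
  have hr : t.length % k.length < k.length := Nat.mod_lt _ hm
  have hflen : (List.replicate (t.length / k.length) k).flatten.length
      = t.length / k.length * k.length := by simp
  rw [mask_eq]
  by_cases h : i < t.length / k.length * k.length
  · rw [List.getElem?_append_left (by omega), flatten_replicate_get? k _ _ h]
  · have hle : (List.replicate (t.length / k.length) k).flatten.length ≤ i := by omega
    rw [List.getElem?_append_right hle, hflen]
    have hj : i - t.length / k.length * k.length < t.length % k.length := by omega
    rw [List.getElem?_take_of_lt hj]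
    congr 1
    have heq : i = t.length / k.length * k.length + (i - t.length / k.length * k.length) := by
      omega
    conv_rhs => rw [heq]
    rw [Nat.add_comm, Nat.add_mul_mod_self_right, Nat.mod_eq_of_lt (by omega)]

lemma findSome?_eq_of_unique {β : Type} (l : List Int) (f : Int → Option β) (x0 : Int) (y : β)
    (hx : x0 ∈ l) (hn : ∀ x ∈ l, x ≠ x0 → f x = none) (hy : f x0 = some y) :
    l.findSome? f = some y := by
  induction l with
  | nil => cases hx
  | cons a l ih =>
    rw [List.findSome?_cons]
    by_cases ha : a = x0
    · subst ha; rw [hy]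
    · rw [hn a (List.mem_cons_self) ha]
      exact ih (List.mem_cons.1 hx |>.resolve_left (fun e => ha e.symm))
        (fun x hxl => hn x (List.mem_cons_of_mem a hxl))

lemma loop_eq (dc dk : Int) (h1 : 0 ≤ dc) (h2 : dc < 53) (h3 : 0 ≤ dk) (h4 : dk < 53) :
    (PySem.List.pyRange 0 53 1).findSome? (fun x =>
      if dc + x > 53 - 1 then (if dc + x - 53 = dk then PySem.List.pyGet? pvAlphabet x else none)
      else (if dc + x = dk then PySem.List.pyGet? pvAlphabet x else none))
    = PySem.List.pyGet? pvAlphabet (PySem.Int.mod (dk - dc) 53) := by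
  have hmod : PySem.Int.mod (dk - dc) 53 = (dk - dc) % 53 :=
    PySem.Int.mod_eq_emod_of_pos (by norm_num)
  set x0 : Int := (dk - dc) % 53 with hx0
  have hb : 0 ≤ x0 ∧ x0 < 53 := ⟨Int.emod_nonneg _ (by norm_num), Int.emod_lt_of_pos _ (by norm_num)⟩
  have hget : ∃ y, PySem.List.pyGet? pvAlphabet x0 = some y := by
    have : x0 = ((x0.toNat : Nat) : Int) := by omega
    rw [this, PySem.List.pyGet?_natCast]
    exact ⟨_, List.getElem?_eq_getElem (by
      have : pvAlphabet.length = 53 := by decide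
      omega)⟩
  obtain ⟨y, hy⟩ := hget
  rw [hmod, hy]
  refine findSome?_eq_of_unique _ _ x0 y (PySem.List.mem_pyRange_one.2 ⟨hb.1, hb.2⟩) ?_ ?_
  · intro x hxl hne
    have hxb := PySem.List.mem_pyRange_one.1 hxl
    by_cases hgt : dc + x > 53 - 1
    · rw [if_pos hgt, if_neg (by omega)]
    · rw [if_neg hgt, if_neg (by omega)]
  · by_cases hgt : dc + x0 > 53 - 1
    · rw [if_pos hgt, if_pos (by omega), hy]
    · rw [if_neg hgt, if_pos (by omega), hy]

lemma translate_eq {c k : Char} (hc : c ∈ pvAlphabet) (hk : k ∈ pvAlphabet) :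
    pvTranslateCharacter c k = PySem.List.pyGet? pvAlphabet
      (PySem.Int.mod (pvDictionary.getD k 0 - pvDictionary.getD c 0) 53) := by
  have hcb := getD_alpha_bounds hc
  have hkb := getD_alpha_bounds hk
  unfold pvTranslateCharacter
  rw [alphaLen]
  exact loop_eq _ _ hcb.1 hcb.2 hkb.1 hkb.2

lemma fixB_eq (c : Char) : pvFixB c = (if c ∈ pvAlphabet then c else '.') := by
  unfold pvFixB
  rw [show pvIdxB = pvDictionary from rfl, contains_eq]
  by_cases h : c ∈ pvAlphabet
  · rw [if_pos (decide_eq_true h), if_pos h]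
  · rw [if_neg (by rw [decide_eq_false h]; exact Bool.false_ne_true), if_neg h]

lemma fixB_mem (c : Char) : pvFixB c ∈ pvAlphabet := by
  rw [fixB_eq]
  by_cases h : c ∈ pvAlphabet
  · rwa [if_pos h]
  · rw [if_neg h]; exact dotMem

lemma filter_eq_mapB (s : List Char) : pvFilterInput s = s.map pvFixB := by
  rw [filter_eq_map]
  exact (List.map_congr_left fun c _ => (fixB_eq c).symm)

def pvChar (t k : List Char) (i : Nat) : Char :=
  (PySem.List.pyGet? pvAlphabet (PySem.Int.mod
     (pvDictionary.getD (k.getD (i % k.length) '.') 0 - pvDictionary.getD (t.getD i '.') 0)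
     53)).getD '.'

lemma alphaGet_some (δ : Int) : ∃ y, PySem.List.pyGet? pvAlphabet (PySem.Int.mod δ 53) = some y := by
  have hb : 0 ≤ PySem.Int.mod δ 53 ∧ PySem.Int.mod δ 53 < 53 :=
    ⟨PySem.Int.mod_nonneg δ (by norm_num), PySem.Int.mod_lt δ (by norm_num)⟩
  have : PySem.Int.mod δ 53 = (((PySem.Int.mod δ 53).toNat : Nat) : Int) := by omega
  rw [this, PySem.List.pyGet?_natCast]
  exact ⟨_, List.getElem?_eq_getElem (by
    have h53 : pvAlphabet.length = 53 := by decide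
    omega)⟩

lemma main_eq (t0 k0 : List Char) (hk : k0 ≠ []) :
    (PySem.List.pyRange 0 ((pvFilterInput t0).length : Int) 1).foldl (fun res i =>
      res ++ ((pvTranslateCharacter ((PySem.List.pyGet? (pvFilterInput t0) i).getD '.')
        ((PySem.List.pyGet? (pvAssignKeyMask (pvFilterInput t0) (pvFilterInput k0)) i).getD '.')).elim
          [] ([·]))) []
    = (PySem.List.enumerate (t0.map pvFixB) 0).map
        (fun p => pvEncCharB (k0.map pvFixB) p.1 p.2) := by
  rw [filter_eq_mapB, filter_eq_mapB]
  set t := t0.map pvFixB with ht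
  set k := k0.map pvFixB with hkk
  have hkne : k ≠ [] := fun h => hk (List.map_eq_nil_iff.1 (hkk ▸ h))
  have hm : 0 < k.length := List.length_pos_iff.2 hkne
  -- A side: fold → flatMap → map
  rw [PySem.List.pyRange_zero_natCast, List.foldl_map, PySem.List.foldl_append_eq_flatMap,
    List.nil_append]
  have hA : (List.range t.length).flatMap (fun (i : Nat) =>
      ((pvTranslateCharacter ((PySem.List.pyGet? t (i : Int)).getD '.')
        ((PySem.List.pyGet? (pvAssignKeyMask t k) (i : Int)).getD '.')).elim [] ([·])))
      = (List.range t.length).map (pvChar t k) := by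
    rw [List.flatMap_congr (g := fun i => [pvChar t k i]) ?_]
    · exact List.map_eq_flatMap.symm
    · intro i hi
      have hlt : i < t.length := List.mem_range.1 hi
      have hmod : i % k.length < k.length := Nat.mod_lt _ hm
      rw [PySem.List.pyGet?_natCast, List.getElem?_eq_getElem hlt,
        PySem.List.pyGet?_natCast, mask_get? t k hkne i hlt,
        List.getElem?_eq_getElem hmod]
      simp only [Option.getD_some]
      have h2 : i < t0.length := by simpa [ht] using hlt
      have hmt : t[i] ∈ pvAlphabet := by
        have he : t[i]'hlt = pvFixB (t0[i]'h2) := by simp only [ht, List.getElem_map]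
        rw [he]; exact fixB_mem _
      have h3 : i % k.length < k0.length := by simpa [hkk] using hmod
      have hmk : k[i % k.length] ∈ pvAlphabet := by
        have he : k[i % k.length]'hmod = pvFixB (k0[i % k.length]'h3) := by
          simp only [hkk, List.getElem_map]
        rw [he]; exact fixB_mem _
      rw [translate_eq hmt hmk]
      obtain ⟨y, hy⟩ := alphaGet_some
        (pvDictionary.getD (k[i % k.length]'hmod) 0 - pvDictionary.getD (t[i]'hlt) 0)
      rw [hy]
      unfold pvChar
      rw [List.getD_eq_getElem k '.' hmod, List.getD_eq_getElem t '.' hlt, hy]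
      rfl
  rw [hA]
  -- B side: enumerate → map over range
  rw [PySem.List.enumerate_eq_map_pyRange t '.',
    show PySem.List.len t = ((t.length : Nat) : Int) from rfl,
    PySem.List.pyRange_zero_natCast, List.map_map, List.map_map]
  refine List.map_congr_left fun i hi => ?_
  have hlt : i < t.length := List.mem_range.1 hi
  have hmod : i % k.length < k.length := Nat.mod_lt _ hm
  simp only [Function.comp_apply]
  unfold pvEncCharB
  rw [PySem.Int.mod_natCast, PySem.List.pyGet?_natCast, List.getElem?_eq_getElem hmod,
    PySem.List.pyGetD_natCast, List.getD_eq_getElem t '.' hlt]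
  simp only [Option.getD_some]
  rw [show pvIdxB = pvDictionary from rfl, alphaLen]
  unfold pvChar
  rw [List.getD_eq_getElem k '.' hmod, List.getD_eq_getElem t '.' hlt]

-- ===== VERDICT (by name: the statement is the Claim_ definition above) =====
theorem useCipher_spec : Claim_equal_useCipher := by
  intro text key _ hpre
  unfold Spec_useCipher useCipher useCipher_alt
  exact congrArg String.mk (main_eq text.toList key.toList hpre)
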